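-- pv_equiv track=rewrite | github.com/fabiog1901/pgworkload | pgworkload/utils/common.py | get_threads_per_proc
-- ===== SOURCE A (Python) =====
-- def get_threads_per_proc(procs: int, threads: int):
--     """Returns a list of threads count per procs
--
--     Args:
--         procs (int): procs count
--         threads (int): threads count
--
--     Returns:
--         list: list of threads per procs
--     """
--
--     c = int(threads / procs)
--     m = threads % procs
--
--     l = [c for _ in range(min(procs, threads))]
--
--     for x in range(m):
--         l[x] += 1
--
--     l.sort()
--
--     return l
-- ===== SOURCE B (Python) =====
-- def get_threads_per_proc(procs: int, threads: int):
--     """Returns a list of threads count per procs.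
--
--     Greedy fair division: walk the slots left to right, each slot takes
--     floor(remaining / slots_left) of the remaining threads.  This yields the
--     counts already in non-decreasing order, with no quotient/remainder
--     precomputation and no sort.
--     """
--     out = []
--     slots = min(procs, threads)
--     rem = threads
--     while slots > 0:
--         q = rem // slots
--         out.append(q)
--         rem -= q
--         slots -= 1
--     return out
-- ===== Notes on version B (the rewrite author's own statement) =====
-- stated objective: alternative
-- what changed: B discards A's quotient/remainder precomputation, increment loop and sort, and instead runs a greedy fair-division pass: each slot in turn takes floor(remaining/slots_left) of the remaining threads, which emits the counts already in non-decreasing order.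
import Mathlib
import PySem

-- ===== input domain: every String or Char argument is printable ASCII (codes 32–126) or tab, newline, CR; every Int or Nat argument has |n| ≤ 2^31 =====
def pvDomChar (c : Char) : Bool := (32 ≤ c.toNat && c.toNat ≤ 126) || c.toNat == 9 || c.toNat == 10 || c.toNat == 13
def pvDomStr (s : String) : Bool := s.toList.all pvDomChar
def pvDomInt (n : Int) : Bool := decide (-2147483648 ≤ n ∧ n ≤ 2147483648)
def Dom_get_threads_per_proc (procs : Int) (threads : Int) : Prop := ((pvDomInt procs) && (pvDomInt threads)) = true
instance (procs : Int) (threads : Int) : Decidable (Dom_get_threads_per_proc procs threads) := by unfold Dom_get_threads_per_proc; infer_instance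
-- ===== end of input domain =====

-- B replaces A's quotient/remainder + increment loop + sort by a greedy fair-division pass
-- (each slot takes floor(remaining/slots_left)); objective: alternative; return value only.

-- ===== PORT A =====
-- c = int(threads / procs): PySem.Int.truncdiv is exact for |args| < 2^53, which Dom guarantees.
-- l[x] += 1: inside Pre_ every index x of range(m) is in range, where .set/.getD is exact.
def get_threads_per_proc (procs : Int) (threads : Int) : List Int :=
  let c := PySem.Int.truncdiv threads procs
  let m := PySem.Int.mod threads procs
  let l := (PySem.List.pyRange 0 (min procs threads) 1).map (fun _ => c)
  let l := (PySem.List.pyRange 0 m 1).foldl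
    (fun acc x => acc.set x.toNat ((acc.getD x.toNat 0) + 1)) l
  PySem.List.sorted l (fun x => x) false

-- ===== PORT B =====
-- the while loop of Source B, structurally: slots counts down 1 per iteration, each step
-- emits rem // slots and subtracts it from rem (slots ≤ 0 means the loop never runs)
def pvGreedyN : Nat → Int → List Int
  | 0, _ => []
  | k + 1, rem =>
    let q := PySem.Int.floordiv rem ((k : Int) + 1)
    q :: pvGreedyN k (rem - q)

def get_threads_per_proc_alt (procs : Int) (threads : Int) : List Int :=
  pvGreedyN (min procs threads).toNat threads

-- ===== PRECONDITION & SPEC =====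
-- Pre_ excludes exactly the inputs where A raises: procs = 0 (ZeroDivisionError) and
-- procs > 0 with threads < 0 not divisible by procs (IndexError in the increment loop).
def Pre_get_threads_per_proc (procs : Int) (threads : Int) : Prop :=
  procs ≠ 0 ∧ ¬(0 < procs ∧ threads < 0 ∧ PySem.Int.mod threads procs ≠ 0)
instance (procs : Int) (threads : Int) : Decidable (Pre_get_threads_per_proc procs threads) := by
  unfold Pre_get_threads_per_proc; infer_instance
def pvWitness_get_threads_per_proc : Int × Int := (4, 10)

def Spec_get_threads_per_proc (procs : Int) (threads : Int) (out : List Int) : Prop := out = get_threads_per_proc_alt procs threads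
instance (procs : Int) (threads : Int) (out : List Int) : Decidable (Spec_get_threads_per_proc procs threads out) := by unfold Spec_get_threads_per_proc; infer_instance

-- ===== CLAIM (what is proved, stated in full; the proofs are below) =====
def Claim_equal_get_threads_per_proc : Prop := ∀ (procs : Int) (threads : Int), Dom_get_threads_per_proc procs threads → Pre_get_threads_per_proc procs threads → Spec_get_threads_per_proc procs threads (get_threads_per_proc procs threads)
-- ===== LEMMAS AND PROOFS =====

-- the constant-comprehension list is a replicate
lemma pv_map_const (n : Int) (c : Int) :
    (PySem.List.pyRange 0 n 1).map (fun _ => c) = List.replicate n.toNat c := by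
  rw [PySem.List.pyRange_one]
  simp [Function.comp_def, List.map_const']

-- A's increment loop on replicate L c: the first k entries become c+1
lemma pv_inc_fold (c : Int) (k L : Nat) (hk : k ≤ L) :
    (PySem.List.pyRange 0 (k : Int) 1).foldl
      (fun acc x => acc.set x.toNat ((acc.getD x.toNat 0) + 1)) (List.replicate L c)
    = List.replicate k (c + 1) ++ List.replicate (L - k) c := by
  induction k with
  | zero => simp [PySem.List.pyRange_one_eq_nil]
  | succ k ih =>
    have hk' : k ≤ L := Nat.le_of_succ_le hk
    have : ((k : Int) + 1) = ((k + 1 : Nat) : Int) := by push_cast; ring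
    rw [← this, PySem.List.pyRange_one_succ_right (by positivity), List.foldl_append,
        ih hk']
    simp only [List.foldl_cons, List.foldl_nil, Int.toNat_natCast]
    have hrep : List.replicate (L - k) c = c :: List.replicate (L - (k + 1)) c := by
      have : L - k = (L - (k + 1)) + 1 := by omega
      rw [this, List.replicate_succ]
    rw [hrep,
      List.getD_append_right (List.replicate k (c + 1)) _ _ _ (by simp),
      List.set_append_right _ _ (by simp : (List.replicate k (c + 1)).length ≤ k)]
    simp [List.replicate_succ' (n := k), List.append_assoc]

-- sorting the two constant blocks puts the smaller block first
lemma pv_sorted_blocks (c : Int) (a b : Nat) :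
    PySem.List.sorted (List.replicate a (c + 1) ++ List.replicate b c) (fun x => x) false
    = List.replicate b c ++ List.replicate a (c + 1) := by
  apply PySem.List.sorted_id_eq_of_perm_of_pairwise
  · exact List.perm_append_comm
  · rw [List.pairwise_append]
    refine ⟨List.pairwise_replicate.2 (by simp), List.pairwise_replicate.2 (by simp), ?_⟩
    intro x hx y hy
    rw [List.eq_of_mem_replicate hx, List.eq_of_mem_replicate hy]
    omega

-- B's greedy loop on s slots and q*s + r remaining (0 ≤ r < s) yields the sorted blocks
lemma pvGreedyN_eq (s : Nat) : ∀ (q r : Int), 0 ≤ r → r < (s : Int) →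
    pvGreedyN s (q * s + r)
    = List.replicate (s - r.toNat) q ++ List.replicate r.toNat (q + 1) := by
  induction s with
  | zero => intro q r h0 h1; omega
  | succ s ih =>
    intro q r h0 h1
    have hs : (0 : Int) < (s : Int) + 1 := by positivity
    have hq : PySem.Int.floordiv (q * ((s + 1 : Nat) : Int) + r) ((s : Int) + 1) = q := by
      rw [PySem.Int.floordiv_eq_iff_of_pos hs]
      push_cast
      push_cast at h1
      constructor <;> nlinarith
    rw [pvGreedyN]
    simp only [hq]
    have harg : q * ((s + 1 : Nat) : Int) + r - q = q * (s : Int) + r := by push_cast; ring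
    rw [harg]
    by_cases hr : r < (s : Int)
    · rw [ih q r h0 hr]
      have : (s + 1) - r.toNat = ((s - r.toNat) + 1) := by omega
      rw [this, List.replicate_succ, List.cons_append]
    · -- r = s: remaining is (q+1) * s exactly
      have hrs : r = (s : Int) := by omega
      have : q * (s : Int) + r = (q + 1) * (s : Int) + 0 := by rw [hrs]; ring
      rw [this]
      by_cases hs0 : 0 < s
      · rw [ih (q + 1) 0 le_rfl (by exact_mod_cast hs0)]
        simp [hrs]
      · have hse : s = 0 := by omega
        subst hse
        simp [pvGreedyN, hrs]

-- ===== VERDICT (by name: the statement is the Claim_ definition above) =====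
theorem get_threads_per_proc_spec : Claim_equal_get_threads_per_proc := by
  intro procs threads _ hpre
  obtain ⟨hp0, hnx⟩ := hpre
  unfold Spec_get_threads_per_proc get_threads_per_proc get_threads_per_proc_alt
  simp only []
  set c := PySem.Int.truncdiv threads procs with hc
  set m := PySem.Int.mod threads procs with hm
  set n := min procs threads with hn
  rcases lt_trichotomy procs 0 with hp | hp | hp
  · -- procs < 0: everything is empty
    have hmb := PySem.Int.mod_neg_bounds (a := threads) hp
    have hn1 : n ≤ 0 := le_trans (min_le_left _ _) (le_of_lt hp)
    rw [PySem.List.pyRange_one_eq_nil hn1, PySem.List.pyRange_one_eq_nil (by omega : m ≤ 0)]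
    have : n.toNat = 0 := by omega
    simp [this, pvGreedyN, PySem.List.sorted]
  · exact absurd hp hp0
  · -- procs > 0
    have hm0 : 0 ≤ m := PySem.Int.mod_nonneg (a := threads) hp
    have hmlt : m < procs := PySem.Int.mod_lt (a := threads) hp
    by_cases ht : threads < 0
    · -- threads < 0: Pre_ forces m = 0, both sides empty
      have hme : m = 0 := by
        by_contra h
        exact hnx ⟨hp, ht, h⟩
      have hn1 : n ≤ 0 := le_trans (min_le_right _ _) (le_of_lt ht)
      have hnn : n.toNat = 0 := by omega
      rw [hme, PySem.List.pyRange_one_eq_nil hn1,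
        PySem.List.pyRange_one_eq_nil (by omega : (0:Int) ≤ 0)]
      simp [hnn, pvGreedyN, PySem.List.sorted]
    · -- 0 ≤ threads: the real case
      push Not at ht
      have hcf : c = PySem.Int.floordiv threads procs := by
        rw [hc, PySem.Int.truncdiv, PySem.Int.floordiv_eq_ediv_of_pos hp]
        simp [Int.tdiv_eq_ediv_of_nonneg ht]
      have hsplit : c * procs + m = threads := by
        rw [hcf, hm]; exact PySem.Int.floordiv_mul_add_mod threads procs
      have hmn : m ≤ n := by
        by_cases h : procs ≤ threads
        · have : n = procs := by omega
          omega
        · have hmt : m = threads := by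
            rw [hm, PySem.Int.mod_eq_emod_of_pos hp, Int.emod_eq_of_lt (by omega) (by omega)]
          omega
      have hn0 : 0 ≤ n := le_trans hm0 hmn
      have hkL : m.toNat ≤ n.toNat := by omega
      rw [pv_map_const,
        show PySem.List.pyRange 0 m 1 = PySem.List.pyRange 0 ((m.toNat : Nat) : Int) 1 from by
          rw [Int.toNat_of_nonneg hm0],
        pv_inc_fold c m.toNat n.toNat hkL, pv_sorted_blocks]
      -- B side: greedy on n slots over threads = c * n + m threads (or all-ones when threads < procs)
      by_cases hle : procs ≤ threads
      · have hnp : n = procs := by omega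
        have h1 : pvGreedyN n.toNat threads = pvGreedyN n.toNat (c * (n.toNat : Nat) + m) := by
          congr 1
          rw [Int.toNat_of_nonneg hn0, hnp]
          linarith [hsplit]
        rw [h1, pvGreedyN_eq n.toNat c m hm0 (by omega)]
      · -- threads < procs: n = threads, m = threads, c = 0
        push Not at hle
        have hnt : n = threads := by omega
        have hmt : m = threads := by
          rw [hm, PySem.Int.mod_eq_emod_of_pos hp, Int.emod_eq_of_lt (by omega) (by omega)]
        have hc0 : c = 0 := by
          rw [hcf]
          rw [PySem.Int.floordiv_eq_iff_of_pos hp]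
          omega
        by_cases ht0 : threads = 0
        · have : n.toNat = 0 := by omega
          simp [this, pvGreedyN, hmt, ht0, hc0]
        · have h1 : pvGreedyN n.toNat threads = pvGreedyN n.toNat (1 * (n.toNat : Nat) + 0) := by
            congr 1
            rw [Int.toNat_of_nonneg hn0, hnt]
            ring
          have hz : n.toNat = m.toNat := by rw [hnt, hmt]
          rw [h1, pvGreedyN_eq n.toNat 1 0 le_rfl (by rw [hnt]; omega)]
          simp [hc0, hz]
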